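-- pv_equiv track=rewrite | github.com/nullhack/beehave | pytest_beehave/syncer.py | _render_data_table
-- ===== SOURCE A (Python) =====
-- from typing import Any, cast
--
-- def _compute_col_widths(all_cells: list[list[str]]) -> list[int]:
--     """Compute the maximum width for each column across all rows.
--
--     Args:
--         all_cells: List of rows, each row is a list of cell value strings.
--
--     Returns:
--         List of column widths (one per column).
--     """
--     col_count = max(len(row) for row in all_cells)
--     return [
--         max(len(row[col]) for row in all_cells if col < len(row))
--         for col in range(col_count)
--     ]
--
-- def _render_padded_row(row_cells: list[str], col_widths: list[int]) -> str:
--     """Render a single table row with padded cell values.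
--
--     Args:
--         row_cells: Cell values for this row.
--         col_widths: Maximum width for each column.
--
--     Returns:
--         Pipe-delimited row string.
--     """
--     padded = [
--         row_cells[col].ljust(col_widths[col])
--         if col < len(row_cells)
--         else " " * col_widths[col]
--         for col in range(len(col_widths))
--     ]
--     return "| " + " | ".join(padded) + " |"
--
-- def _render_data_table(rows: list[dict[str, Any]]) -> str:
--     """Render a Gherkin data table preserving original column widths.
--
--     Args:
--         rows: List of row dicts, each with a 'cells' list of dicts with 'value'.
--
--     Returns:
--         Multi-line string with each row as '| val1 | val2 |'.
--     """
--     if not rows: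
--         return ""
--     all_cells = [
--         [cell.get("value", "") for cell in row.get("cells", [])] for row in rows
--     ]
--     col_widths = _compute_col_widths(all_cells)
--     return "\n".join(_render_padded_row(row, col_widths) for row in all_cells)
-- ===== SOURCE B (Python) =====
-- def _cell_values(cells):
--     """Extract 'value' strings recursively."""
--     if not cells:
--         return []
--     return [cells[0].get("value", "")] + _cell_values(cells[1:])
--
--
-- def _lengths(values):
--     if not values:
--         return []
--     return [len(values[0])] + _lengths(values[1:])
--
--
-- def _merge_widths(xs, ys):
--     """Pointwise max of two width lists, keeping the longer tail."""
--     if not xs: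
--         return ys
--     if not ys:
--         return xs
--     return [max(xs[0], ys[0])] + _merge_widths(xs[1:], ys[1:])
--
--
-- def _table_widths(rows):
--     """Column widths by recursively merging each row's cell lengths."""
--     if not rows:
--         return []
--     return _merge_widths(
--         _lengths(_cell_values(rows[0].get("cells", []))), _table_widths(rows[1:])
--     )
--
--
-- def _row_text(values, widths):
--     """Interior of one rendered row, built recursively over the widths."""
--     if not widths:
--         return ""
--     v = values[0] if values else ""
--     cell = v + " " * (widths[0] - len(v))
--     if len(widths) == 1:
--         return cell
--     return cell + " | " + _row_text(values[1:], widths[1:])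
--
--
-- def _render_rows(rows, widths):
--     if not rows:
--         return ""
--     line = "| " + _row_text(_cell_values(rows[0].get("cells", [])), widths) + " |"
--     if len(rows) == 1:
--         return line
--     return line + "\n" + _render_rows(rows[1:], widths)
--
--
-- def _render_data_table(rows):
--     """Render a Gherkin data table, fully recursive decomposition."""
--     return _render_rows(rows, _table_widths(rows))
-- ===== Notes on version B (the rewrite author's own statement) =====
-- stated objective: alternative
-- what changed: B is a fully recursive decomposition: column widths come from recursively merging each row's cell-length list (pointwise max keeping the longer tail) and rows/cells are rendered by structural recursion with explicit separators, instead of A's column-major comprehensions that index by range() and re-scan all rows per column.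
import Mathlib
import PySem

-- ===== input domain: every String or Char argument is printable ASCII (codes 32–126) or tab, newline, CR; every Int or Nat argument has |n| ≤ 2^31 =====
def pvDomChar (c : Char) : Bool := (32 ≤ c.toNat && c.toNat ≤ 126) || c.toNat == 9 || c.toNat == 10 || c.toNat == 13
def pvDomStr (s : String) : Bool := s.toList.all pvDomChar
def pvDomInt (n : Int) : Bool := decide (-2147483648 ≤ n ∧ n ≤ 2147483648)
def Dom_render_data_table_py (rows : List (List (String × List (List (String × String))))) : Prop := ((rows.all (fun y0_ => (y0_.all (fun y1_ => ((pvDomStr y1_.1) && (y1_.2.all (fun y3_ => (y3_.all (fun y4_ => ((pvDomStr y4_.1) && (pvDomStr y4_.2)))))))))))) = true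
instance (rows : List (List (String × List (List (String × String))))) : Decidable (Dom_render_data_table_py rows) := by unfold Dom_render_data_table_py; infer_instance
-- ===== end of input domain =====

-- B replaces A's column-major width comprehension (range() over columns, re-scanning all
-- rows per column) and its index-based row rendering by a fully recursive decomposition:
-- widths by recursively merging per-row length lists, rendering by structural recursion.
-- Objective: alternative decomposition, same output.

-- ===== PORT A =====
-- s.ljust(w): pad with spaces on the right (exact: Python pads with ' ' to width w in characters)
def pvLjust (cs : List Char) (w : Nat) : List Char := cs ++ List.replicate (w - cs.length) ' '

-- [cell.get("value", "") for cell in row.get("cells", [])]  (dict lookups via PySem.Dict)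
def pvCellsA (row : List (String × List (List (String × String)))) : List (List Char) :=
  (PySem.Dict.getD (PySem.Dict.mk row) "cells" []).map
    (fun cell => (PySem.Dict.getD (PySem.Dict.mk cell) "value" "").toList)

-- _compute_col_widths: col_count = max(len(row) for row in all_cells) ported as the running-max
-- loop (exact: all_cells is nonempty when this is called and lengths are ≥ 0); each column's
-- max-over-filtered-generator ported as a guarded running-max loop (exact: for col < col_count
-- the filtered set is nonempty and lengths are ≥ 0)
def pvColWidths (all_cells : List (List (List Char))) : List Nat :=
  let colCount := all_cells.foldl (fun m r => max m r.length) 0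
  (List.range colCount).map
    (fun col => all_cells.foldl (fun m r => if col < r.length then max m (r.getD col []).length else m) 0)

-- _render_padded_row
def pvPadRow (row_cells : List (List Char)) (col_widths : List Nat) : List Char :=
  "| ".toList ++
    PySem.Chars.join " | ".toList
      ((List.range col_widths.length).map
        (fun col =>
          if col < row_cells.length then pvLjust (row_cells.getD col []) (col_widths.getD col 0)
          else List.replicate (col_widths.getD col 0) ' ')) ++
    " |".toList

def render_data_table_py (rows : List (List (String × List (List (String × String))))) : String :=
  if rows.isEmpty then "" else
    let all_cells := rows.map pvCellsA
    let col_widths := pvColWidths all_cells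
    String.ofList (PySem.Chars.join ['\n'] (all_cells.map (fun r => pvPadRow r col_widths)))

-- ===== PORT B =====
-- _cell_values: recursive extraction of each cell's "value"
def altCellValues : List (List (String × String)) → List (List Char)
  | [] => []
  | c :: cs => (PySem.Dict.getD (PySem.Dict.mk c) "value" "").toList :: altCellValues cs

-- _lengths
def altLens : List (List Char) → List Nat
  | [] => []
  | v :: vs => v.length :: altLens vs

-- _merge_widths: pointwise max keeping the longer tail
def altMerge : List Nat → List Nat → List Nat
  | [], ys => ys
  | x :: xs, [] => x :: xs
  | x :: xs, y :: ys => max x y :: altMerge xs ys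

-- _table_widths
def altWidths : List (List (String × List (List (String × String)))) → List Nat
  | [] => []
  | r :: rs =>
    altMerge (altLens (altCellValues (PySem.Dict.getD (PySem.Dict.mk r) "cells" []))) (altWidths rs)

-- _row_text: interior of one rendered row, recursion over the widths
-- (" " * (w - len v) is exact: Nat subtraction truncates like Python's '' on negative counts)
def altRowText : List (List Char) → List Nat → List Char
  | _, [] => []
  | [], [w] => List.replicate w ' '
  | [], w :: ws => List.replicate w ' ' ++ " | ".toList ++ altRowText [] ws
  | v :: _, [w] => v ++ List.replicate (w - v.length) ' '
  | v :: vs, w :: ws => (v ++ List.replicate (w - v.length) ' ') ++ " | ".toList ++ altRowText vs ws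

-- _render_rows
def altRenderRows : List (List (String × List (List (String × String)))) → List Nat → List Char
  | [], _ => []
  | [r], ws =>
    "| ".toList ++ altRowText (altCellValues (PySem.Dict.getD (PySem.Dict.mk r) "cells" [])) ws ++ " |".toList
  | r :: rs, ws =>
    ("| ".toList ++ altRowText (altCellValues (PySem.Dict.getD (PySem.Dict.mk r) "cells" [])) ws ++ " |".toList)
      ++ ['\n'] ++ altRenderRows rs ws

def render_data_table_py_alt (rows : List (List (String × List (List (String × String))))) : String :=
  String.ofList (altRenderRows rows (altWidths rows))

-- ===== PRECONDITION & SPEC =====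
def Spec_render_data_table_py (rows : List (List (String × List (List (String × String))))) (out : String) : Prop := out = render_data_table_py_alt rows
instance (rows : List (List (String × List (List (String × String))))) (out : String) : Decidable (Spec_render_data_table_py rows out) := by unfold Spec_render_data_table_py; infer_instance

-- ===== CLAIM (what is proved, stated in full; the proofs are below) =====
def Claim_equal_render_data_table_py : Prop := ∀ (rows : List (List (String × List (List (String × String))))), Dom_render_data_table_py rows → Spec_render_data_table_py rows (render_data_table_py rows)

-- ===== LEMMAS AND PROOFS =====

lemma altCellValues_eq (cs : List (List (String × String))) :
    altCellValues cs = cs.map (fun cell => (PySem.Dict.getD (PySem.Dict.mk cell) "value" "").toList) := by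
  induction cs with
  | nil => rfl
  | cons c cs ih => simp [altCellValues, ih]

lemma altLens_eq (vs : List (List Char)) : altLens vs = vs.map List.length := by
  induction vs with
  | nil => rfl
  | cons v vs ih => simp [altLens, ih]

lemma altMerge_length (xs ys : List Nat) : (altMerge xs ys).length = max xs.length ys.length := by
  induction xs generalizing ys with
  | nil => simp [altMerge]
  | cons x xs ih =>
    cases ys with
    | nil => simp [altMerge]
    | cons y ys => simp only [altMerge, List.length_cons, ih]; omega

lemma altMerge_getD (xs ys : List Nat) (i : Nat) :
    (altMerge xs ys).getD i 0 = max (xs.getD i 0) (ys.getD i 0) := by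
  induction xs generalizing ys i with
  | nil => simp [altMerge]
  | cons x xs ih =>
    cases ys with
    | nil => simp [altMerge]
    | cons y ys =>
      cases i with
      | zero => simp [altMerge]
      | succ i => simpa [altMerge] using ih ys i

lemma foldl_max_len (L : List (List (List Char))) (a : Nat) :
    L.foldl (fun m r => max m r.length) a = max a (L.foldr (fun r n => max r.length n) 0) := by
  induction L generalizing a with
  | nil => simp
  | cons r L ih => simp only [List.foldl_cons, List.foldr_cons, ih]; omega

lemma foldl_max_get (L : List (List (List Char))) (a i : Nat) :
    L.foldl (fun m r => if i < r.length then max m (r.getD i []).length else m) a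
      = max a (L.foldr (fun r n => max ((r.map List.length).getD i 0) n) 0) := by
  induction L generalizing a with
  | nil => simp
  | cons r L ih =>
    simp only [List.foldl_cons, List.foldr_cons, ih]
    by_cases h : i < r.length
    · have hm : (r.map List.length).getD i 0 = (r.getD i []).length := by
        rw [List.getD_eq_getElem _ _ (by simpa using h), List.getD_eq_getElem _ _ h]
        simp
      rw [if_pos h, hm]; omega
    · have hm : (r.map List.length).getD i 0 = 0 := by
        rw [List.getD_eq_default]; simpa using h
      rw [if_neg h, hm]; omega

lemma altWidths_length (rs : List (List (String × List (List (String × String))))) :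
    (altWidths rs).length = rs.foldr (fun r n => max (pvCellsA r).length n) 0 := by
  induction rs with
  | nil => rfl
  | cons r rs ih =>
    simp only [altWidths, altMerge_length, ih, List.foldr_cons]
    congr 1
    simp [altLens_eq, altCellValues_eq, pvCellsA]

lemma altWidths_getD (rs : List (List (String × List (List (String × String))))) (i : Nat) :
    (altWidths rs).getD i 0
      = rs.foldr (fun r n => max (((pvCellsA r).map List.length).getD i 0) n) 0 := by
  induction rs with
  | nil => rfl
  | cons r rs ih =>
    simp only [altWidths, altMerge_getD, ih, List.foldr_cons]
    congr 1
    simp [altLens_eq, altCellValues_eq, pvCellsA]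

-- B's recursive merge computes exactly A's column-major width list
lemma widths_eq (rs : List (List (String × List (List (String × String))))) :
    altWidths rs = pvColWidths (rs.map pvCellsA) := by
  apply List.ext_getElem
  · simp [pvColWidths, altWidths_length, foldl_max_len, List.foldr_map]
  · intro i h1 h2
    rw [← List.getD_eq_getElem _ 0 h1, ← List.getD_eq_getElem _ 0 h2, altWidths_getD]
    have hi : i < (rs.map pvCellsA).foldl (fun m r => max m r.length) 0 := by
      simpa [pvColWidths] using h2
    simp only [pvColWidths]
    rw [List.getD_eq_getElem _ _ (by simpa [pvColWidths] using h2)]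
    simp only [List.getElem_map, List.getElem_range]
    rw [foldl_max_get, List.foldr_map]
    simp

-- the list of padded cells, in the shape of B's recursion
def padList : List (List Char) → List Nat → List (List Char)
  | _, [] => []
  | [], w :: ws => List.replicate w ' ' :: padList [] ws
  | v :: vs, w :: ws => (v ++ List.replicate (w - v.length) ' ') :: padList vs ws

lemma altRowText_eq_join (vs : List (List Char)) (ws : List Nat) :
    altRowText vs ws = PySem.Chars.join " | ".toList (padList vs ws) := by
  induction ws generalizing vs with
  | nil => cases vs <;> simp [altRowText, padList, PySem.Chars.join_nil]
  | cons w ws ih =>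
    cases ws with
    | nil =>
      cases vs <;> simp [altRowText, padList, PySem.Chars.join_singleton]
    | cons w' ws' =>
      cases vs with
      | nil =>
        simp [altRowText, padList, PySem.Chars.join_cons_cons, ih]
      | cons v vs' =>
        cases vs' with
        | nil =>
          simp [altRowText, padList, PySem.Chars.join_cons_cons, ih]
        | cons v' vs'' =>
          simp [altRowText, padList, PySem.Chars.join_cons_cons, ih]

lemma padList_eq (vs : List (List Char)) (ws : List Nat) :
    padList vs ws = (List.range ws.length).map
      (fun col => if col < vs.length then pvLjust (vs.getD col []) (ws.getD col 0)
        else List.replicate (ws.getD col 0) ' ') := by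
  induction ws generalizing vs with
  | nil => cases vs <;> rfl
  | cons w ws ih =>
    rw [List.length_cons, List.range_succ_eq_map, List.map_cons, List.map_map]
    cases vs with
    | nil =>
      simp only [padList, ih]
      refine List.cons_eq_cons.mpr ⟨by simp, ?_⟩
      apply List.map_congr_left
      intro a _
      simp
    | cons v vs' =>
      simp only [padList, ih]
      refine List.cons_eq_cons.mpr ⟨by simp [pvLjust], ?_⟩
      apply List.map_congr_left
      intro a _
      simp

lemma row_eq (vs : List (List Char)) (ws : List Nat) :
    "| ".toList ++ altRowText vs ws ++ " |".toList = pvPadRow vs ws := by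
  rw [altRowText_eq_join, padList_eq, pvPadRow]

lemma render_eq (rs : List (List (String × List (List (String × String))))) (ws : List Nat) :
    altRenderRows rs ws
      = PySem.Chars.join ['\n'] ((rs.map pvCellsA).map (fun r => pvPadRow r ws)) := by
  induction rs with
  | nil => simp [altRenderRows, PySem.Chars.join_nil]
  | cons r rs ih =>
    have hcell : altCellValues (PySem.Dict.getD (PySem.Dict.mk r) "cells" []) = pvCellsA r := by
      simp [altCellValues_eq, pvCellsA]
    cases rs with
    | nil =>
      show "| ".toList ++ altRowText (altCellValues (PySem.Dict.getD (PySem.Dict.mk r) "cells" [])) ws ++ " |".toList = _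
      rw [hcell, row_eq]
      simp [PySem.Chars.join_singleton]
    | cons r' rs' =>
      show ("| ".toList ++ altRowText (altCellValues (PySem.Dict.getD (PySem.Dict.mk r) "cells" [])) ws ++ " |".toList) ++ ['\n'] ++ altRenderRows (r' :: rs') ws = _
      rw [hcell, row_eq, ih]
      simp [PySem.Chars.join_cons_cons]

-- ===== VERDICT (by name: the statement is the Claim_ definition above) =====
theorem render_data_table_py_spec : Claim_equal_render_data_table_py := by
  intro rows _
  unfold Spec_render_data_table_py render_data_table_py render_data_table_py_alt
  cases rows with
  | nil => rfl
  | cons r rs =>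
    simp only [List.isEmpty_cons, Bool.false_eq_true, if_false]
    rw [widths_eq, render_eq]
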